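-- pv_equiv track=rewrite | github.com/XMihura/Kanvas | canvas-tool.py | has_cycle_with_edge
-- ===== SOURCE A (Python) =====
-- from collections import defaultdict
--
-- def build_adj(canvas):
--     """Build adjacency list: adj[from_id] = [to_id, ...]."""
--     adj = defaultdict(list)
--     for e in canvas.get("edges", []):
--         adj[e.get("fromNode")].append(e.get("toNode"))
--     return adj
--
-- def has_cycle_with_edge(canvas, from_id, to_id):
--     """Check if adding edge from_id -> to_id would create a cycle.
--
--     Only checks whether to_id can already reach from_id through existing
--     edges.  If it can, adding from_id -> to_id would close a loop.
--     """
--     if from_id == to_id: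
--         return True
--     adj = build_adj(canvas)
--     visited = set()
--     stack = [to_id]
--     while stack:
--         nid = stack.pop()
--         if nid == from_id:
--             return True
--         if nid in visited:
--             continue
--         visited.add(nid)
--         stack.extend(adj.get(nid, []))
--     return False
-- ===== SOURCE B (Python) =====
-- from collections import defaultdict
--
--
-- def build_adj(canvas):
--     """Build adjacency list: adj[from_id] = [to_id, ...]."""
--     adj = defaultdict(list)
--     for e in canvas.get("edges", []):
--         adj[e.get("fromNode")].append(e.get("toNode"))
--     return adj
--
--
-- def has_cycle_with_edge(canvas, from_id, to_id):
--     """Check if adding edge from_id -> to_id would create a cycle.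
--
--     Frontier-based breadth-first saturation from to_id instead of an
--     explicit DFS stack: expand the whole frontier each round until
--     from_id is seen or no new node appears.
--     """
--     if from_id == to_id:
--         return True
--     adj = build_adj(canvas)
--     reached = {to_id}
--     frontier = {to_id}
--     while frontier:
--         if from_id in frontier:
--             return True
--         nxt = set()
--         for n in frontier:
--             nxt |= set(adj.get(n, []))
--         frontier = nxt - reached
--         reached |= frontier
--     return False
-- ===== Notes on version B (the rewrite author's own statement) =====
-- stated objective: alternative
-- what changed: Replaces A's explicit-stack depth-first search with a frontier-based breadth-first saturation: each round expands the whole frontier into a set of new nodes instead of popping one node at a time from a stack.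
import Mathlib
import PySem

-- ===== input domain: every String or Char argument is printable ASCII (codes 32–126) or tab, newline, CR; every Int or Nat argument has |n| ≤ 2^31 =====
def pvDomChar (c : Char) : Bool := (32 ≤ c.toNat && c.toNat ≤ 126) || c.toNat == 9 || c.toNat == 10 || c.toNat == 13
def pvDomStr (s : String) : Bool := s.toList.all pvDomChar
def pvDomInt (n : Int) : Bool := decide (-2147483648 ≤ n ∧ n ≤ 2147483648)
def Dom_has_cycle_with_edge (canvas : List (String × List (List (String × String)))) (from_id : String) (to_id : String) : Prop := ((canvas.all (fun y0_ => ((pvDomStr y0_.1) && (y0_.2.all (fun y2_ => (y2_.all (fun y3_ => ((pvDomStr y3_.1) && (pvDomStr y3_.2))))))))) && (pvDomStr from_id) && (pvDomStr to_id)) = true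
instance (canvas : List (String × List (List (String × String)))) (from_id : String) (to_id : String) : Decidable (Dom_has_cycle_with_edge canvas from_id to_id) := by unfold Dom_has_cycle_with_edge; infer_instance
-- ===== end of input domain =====

-- B replaces A's explicit-stack DFS by a frontier-based BFS saturation from to_id (objective: alternative; same reachability answer).
-- Nodes are Option String because e.get("fromNode") / e.get("toNode") may be None.

-- ===== PORT A =====

-- shared helper (identical in Source A and Source B): adjacency dict fromNode -> [toNode, ...]
def build_adj (canvas : List (String × List (List (String × String)))) :
    PySem.Dict (Option String) (List (Option String)) :=
  (PySem.Dict.getD (PySem.Dict.mk canvas) "edges" []).foldl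
    (fun adj e =>
      adj.modify ((PySem.Dict.mk e).get? "fromNode") []
        (fun l => l ++ [(PySem.Dict.mk e).get? "toNode"]))
    PySem.Dict.empty

-- termination measure for A's while loop: stack size plus total length of adjacency
-- lists whose key is not yet visited (strictly decreases at every iteration)
def dfsWeight (adj : PySem.Dict (Option String) (List (Option String)))
    (vis : PySem.Set (Option String)) : Nat :=
  (adj.items.map (fun p => if PySem.Set.contains vis p.1 then 0 else p.2.length)).sum

theorem contains_iff {s : PySem.Set (Option String)} {x : Option String} :
    PySem.Set.contains s x = true ↔ x ∈ s := by
  simp [PySem.Set.contains, List.contains_eq_mem]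

theorem dfsWeight_mono_map (l : List (Option String × List (Option String)))
    (r r' : PySem.Set (Option String))
    (h : ∀ y, PySem.Set.contains r y = true → PySem.Set.contains r' y = true) :
    (l.map (fun p => if PySem.Set.contains r' p.1 then 0 else p.2.length)).sum
      ≤ (l.map (fun p => if PySem.Set.contains r p.1 then 0 else p.2.length)).sum := by
  apply List.sum_le_sum
  intro p _
  by_cases hc : PySem.Set.contains r p.1 = true
  · have hm : p.1 ∈ r := contains_iff.1 hc
    have hm' : p.1 ∈ r' := contains_iff.1 (h p.1 hc)
    simp [hm, hm']
  · have hc' : PySem.Set.contains r p.1 = false := by simpa using hc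
    simp only [hc', Bool.false_eq_true, if_false]
    split <;> omega

theorem dfsWeight_add_le (l : List (Option String × List (Option String)))
    (vis : PySem.Set (Option String)) (nid : Option String)
    (h : PySem.Set.contains vis nid = false) :
    (l.map (fun p => if PySem.Set.contains (PySem.Set.add vis nid) p.1 then 0 else p.2.length)).sum
      + ((Option.map (fun q => q.2) (l.find? (fun p => p.1 == nid))).getD []).length
    ≤ (l.map (fun p => if PySem.Set.contains vis p.1 then 0 else p.2.length)).sum := by
  induction l with
  | nil => simp
  | cons a t ih =>
    have hmono := dfsWeight_mono_map t vis (PySem.Set.add vis nid)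
      (by intro y hy
          simp only [PySem.Set.contains, List.contains_eq_mem, decide_eq_true_eq] at hy ⊢
          exact (PySem.Set.mem_add vis nid y).2 (Or.inl hy))
    by_cases hk : a.1 = nid
    · have hbeq : (a.1 == nid) = true := beq_iff_eq.mpr hk
      have hfind : (a :: t).find? (fun p => p.1 == nid) = some a := by
        simp [List.find?, hbeq]
      have hnew : PySem.Set.contains (PySem.Set.add vis nid) a.1 = true := by
        simp only [PySem.Set.contains, List.contains_eq_mem, decide_eq_true_eq]
        exact (PySem.Set.mem_add vis nid a.1).2 (Or.inr hk)
      have hold : PySem.Set.contains vis a.1 = false := by rw [hk]; exact h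
      simp only [hfind, List.map_cons, List.sum_cons, hnew, hold, if_true,
        Bool.false_eq_true, if_false, Option.map_some, Option.getD_some]
      omega
    · have hbeq : (a.1 == nid) = false := beq_eq_false_iff_ne.mpr hk
      have hfind : (a :: t).find? (fun p => p.1 == nid) = t.find? (fun p => p.1 == nid) := by
        simp [List.find?, hbeq]
      have hsame : PySem.Set.contains (PySem.Set.add vis nid) a.1
          = PySem.Set.contains vis a.1 := by
        simp only [PySem.Set.contains, List.contains_eq_mem]
        by_cases hm : a.1 ∈ vis
        · simp [hm, (PySem.Set.mem_add vis nid a.1).2 (Or.inl hm)]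
        · have : a.1 ∉ PySem.Set.add vis nid := by
            intro hx
            rcases (PySem.Set.mem_add vis nid a.1).1 hx with h1 | h1
            · exact hm h1
            · exact hk h1
          simp [hm, this]
      simp only [hfind, List.map_cons, List.sum_cons, hsame]
      omega

-- A's while/stack loop (Python's stack.pop() pops the END of the list: the Lean list
-- holds the stack top-first, so extend(l) prepends l.reverse — same pops in the same order)
def dfsA (adj : PySem.Dict (Option String) (List (Option String))) (from_id : String) :
    List (Option String) → PySem.Set (Option String) → Bool
  | [], _ => false
  | nid :: rest, visited =>
    if nid == some from_id then true
    else if hv : PySem.Set.contains visited nid then dfsA adj from_id rest visited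
    else dfsA adj from_id ((PySem.Dict.getD adj nid []).reverse ++ rest)
          (PySem.Set.add visited nid)
termination_by stack visited => stack.length + dfsWeight adj visited
decreasing_by
  · simp only [List.length_cons]; omega
  · have hv' : PySem.Set.contains visited nid = false := by
      simpa using hv
    have := dfsWeight_add_le adj.items visited nid hv'
    simp only [dfsWeight, List.length_append, List.length_reverse, List.length_cons,
      PySem.Dict.getD, PySem.Dict.get?] at *
    omega

def has_cycle_with_edge (canvas : List (String × List (List (String × String)))) (from_id : String) (to_id : String) : Bool :=
  if from_id == to_id then true
  else
    let adj := build_adj canvas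
    dfsA adj from_id [some to_id] PySem.Set.empty

-- ===== PORT B =====

-- termination measure for B's loop: number of value occurrences not yet reached
def bfsWeight (adj : PySem.Dict (Option String) (List (Option String)))
    (reached : PySem.Set (Option String)) : Nat :=
  (adj.items.map (fun p => (p.2.filter (fun y => !PySem.Set.contains reached y)).length)).sum

theorem countP_lt_of_witness {α : Type} {l : List α} {p q : α → Bool}
    (hpq : ∀ y ∈ l, p y = true → q y = true) {x : α} (hx : x ∈ l)
    (hpx : p x = false) (hqx : q x = true) : l.countP p < l.countP q := by
  induction l with
  | nil => cases hx
  | cons a t ih =>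
    rcases List.mem_cons.1 hx with hx | hx
    · subst hx
      have ht : t.countP p ≤ t.countP q :=
        List.countP_mono_left (fun y hy => hpq y (List.mem_cons_of_mem _ hy))
      simp [List.countP_cons, hpx, hqx]
      omega
    · have := ih (fun y hy => hpq y (List.mem_cons_of_mem _ hy)) hx
      simp only [List.countP_cons]
      by_cases hp : p a = true
      · simp [hp, hpq a (List.mem_cons_self) hp]; omega
      · simp only [hp, Bool.false_eq_true, if_false]
        split <;> omega

theorem not_contains_mono {r r' : PySem.Set (Option String)}
    (hsub : ∀ y, PySem.Set.contains r y = true → PySem.Set.contains r' y = true)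
    (y : Option String) (hy : (!PySem.Set.contains r' y) = true) :
    (!PySem.Set.contains r y) = true := by
  cases hcr : PySem.Set.contains r y
  · rfl
  · rw [hsub y hcr] at hy
    simp at hy

theorem bfsWeight_lt_list (l : List (Option String × List (Option String)))
    (r r' : PySem.Set (Option String))
    (hsub : ∀ y, PySem.Set.contains r y = true → PySem.Set.contains r' y = true)
    (e : Option String × List (Option String)) (he : e ∈ l)
    (x : Option String) (hx : x ∈ e.2)
    (hxr : PySem.Set.contains r x = false) (hxr' : PySem.Set.contains r' x = true) :
    (l.map (fun p => (p.2.filter (fun y => !PySem.Set.contains r' y)).length)).sum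
      < (l.map (fun p => (p.2.filter (fun y => !PySem.Set.contains r y)).length)).sum := by
  obtain ⟨s, t, rfl⟩ := List.append_of_mem he
  simp only [List.map_append, List.map_cons, List.sum_append, List.sum_cons,
    ← List.countP_eq_length_filter]
  have hmonoS : (s.map (fun p => p.2.countP (fun y => !PySem.Set.contains r' y))).sum
      ≤ (s.map (fun p => p.2.countP (fun y => !PySem.Set.contains r y))).sum := by
    apply List.sum_le_sum; intro p _
    exact List.countP_mono_left (fun y _ => not_contains_mono hsub y)
  have hmonoT : (t.map (fun p => p.2.countP (fun y => !PySem.Set.contains r' y))).sum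
      ≤ (t.map (fun p => p.2.countP (fun y => !PySem.Set.contains r y))).sum := by
    apply List.sum_le_sum; intro p _
    exact List.countP_mono_left (fun y _ => not_contains_mono hsub y)
  have hmid : e.2.countP (fun y => !PySem.Set.contains r' y)
      < e.2.countP (fun y => !PySem.Set.contains r y) := by
    refine countP_lt_of_witness (fun y _ => not_contains_mono hsub y) hx ?_ ?_
    · rw [hxr']; rfl
    · rw [hxr]; rfl
  omega

-- membership in the nxt accumulation loop
theorem mem_foldl_union {l : List (Option String)}
    (g : Option String → List (Option String)) (s : PySem.Set (Option String))
    (y : Option String) :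
    y ∈ l.foldl (fun s n => PySem.Set.union s (g n)) s ↔ y ∈ s ∨ ∃ n ∈ l, y ∈ g n := by
  induction l generalizing s with
  | nil => simp
  | cons a t ih =>
    rw [List.foldl_cons, ih]
    constructor
    · rintro (hy | hy)
      · rcases (PySem.Set.mem_union s (g a) y).1 hy with h1 | h1
        · exact Or.inl h1
        · exact Or.inr ⟨a, List.mem_cons_self, h1⟩
      · obtain ⟨n, hn, hyn⟩ := hy
        exact Or.inr ⟨n, List.mem_cons_of_mem _ hn, hyn⟩
    · rintro (hy | ⟨n, hn, hyn⟩)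
      · exact Or.inl ((PySem.Set.mem_union s (g a) y).2 (Or.inl hy))
      · rcases List.mem_cons.1 hn with hn | hn
        · exact Or.inl ((PySem.Set.mem_union s (g a) y).2 (Or.inr (hn ▸ hyn)))
        · exact Or.inr ⟨n, hn, hyn⟩

-- B's inner for loop: nxt = union of adjacency lists of the frontier
def nxtOf (adj : PySem.Dict (Option String) (List (Option String)))
    (frontier : PySem.Set (Option String)) : PySem.Set (Option String) :=
  frontier.foldl (fun s n => PySem.Set.union s (PySem.Dict.getD adj n [])) PySem.Set.empty

theorem mem_nxtOf {adj : PySem.Dict (Option String) (List (Option String))}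
    {frontier : PySem.Set (Option String)} {y : Option String} :
    y ∈ nxtOf adj frontier ↔ ∃ n ∈ frontier, y ∈ PySem.Dict.getD adj n [] := by
  unfold nxtOf
  rw [mem_foldl_union]
  simp

-- B's while loop: frontier-based saturation
def bfsB (adj : PySem.Dict (Option String) (List (Option String))) (from_id : String)
    (frontier reached : PySem.Set (Option String)) : Bool :=
  if frontier.isEmpty then false
  else if PySem.Set.contains frontier (some from_id) then true
  else
    let frontier' := PySem.Set.diff (nxtOf adj frontier) reached
    bfsB adj from_id frontier' (PySem.Set.union reached frontier')
termination_by (bfsWeight adj reached, frontier.length)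
decreasing_by
  rcases hf : PySem.Set.diff (nxtOf adj frontier) reached with _ | ⟨x, xs⟩
  · apply Prod.Lex.right'
    · exact Nat.le_refl _
    · rename_i hne _
      have hfr : frontier ≠ [] := by simpa [List.isEmpty_iff] using hne
      cases frontier with
      | nil => exact absurd rfl hfr
      | cons a t => simp
  · apply Prod.Lex.left
    have hxmem : x ∈ PySem.Set.diff (nxtOf adj frontier) reached := by
      rw [hf]; exact List.mem_cons_self
    have hxd := hxmem
    unfold PySem.Set.diff at hxd
    rw [List.mem_filter] at hxd
    obtain ⟨hxnxt, hxnr⟩ := hxd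
    have hxnr' : PySem.Set.contains reached x = false := by simpa using hxnr
    obtain ⟨n, -, hxn⟩ := mem_nxtOf.1 hxnxt
    rcases hget : PySem.Dict.get? adj n with _ | L
    · rw [PySem.Dict.getD, hget] at hxn; cases hxn
    · rw [PySem.Dict.getD, hget] at hxn
      have hitems : (n, L) ∈ adj.items := PySem.Dict.mem_items_of_get?_eq_some adj hget
      unfold bfsWeight
      refine bfsWeight_lt_list adj.items reached _ ?_ (n, L) hitems x hxn hxnr' ?_
      · intro y hy
        simp only [PySem.Set.contains, List.contains_eq_mem, decide_eq_true_eq] at hy ⊢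
        exact (PySem.Set.mem_union _ _ y).2 (Or.inl hy)
      · simp only [PySem.Set.contains, List.contains_eq_mem, decide_eq_true_eq]
        exact (PySem.Set.mem_union _ _ x).2 (Or.inr (hf ▸ hxmem))

def has_cycle_with_edge_alt (canvas : List (String × List (List (String × String)))) (from_id : String) (to_id : String) : Bool :=
  if from_id == to_id then true
  else
    let adj := build_adj canvas
    bfsB adj from_id (PySem.Set.ofList [some to_id]) (PySem.Set.ofList [some to_id])

-- ===== PRECONDITION & SPEC =====
def Spec_has_cycle_with_edge (canvas : List (String × List (List (String × String)))) (from_id : String) (to_id : String) (out : Bool) : Prop := out = has_cycle_with_edge_alt canvas from_id to_id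
instance (canvas : List (String × List (List (String × String)))) (from_id : String) (to_id : String) (out : Bool) : Decidable (Spec_has_cycle_with_edge canvas from_id to_id out) := by unfold Spec_has_cycle_with_edge; infer_instance

-- ===== CLAIM (what is proved, stated in full; the proofs are below) =====
def Claim_equal_has_cycle_with_edge : Prop := ∀ (canvas : List (String × List (List (String × String)))) (from_id : String) (to_id : String), Dom_has_cycle_with_edge canvas from_id to_id → Spec_has_cycle_with_edge canvas from_id to_id (has_cycle_with_edge canvas from_id to_id)

-- ===== LEMMAS AND PROOFS =====

-- graph reachability along the adjacency dict
inductive Reach (adj : PySem.Dict (Option String) (List (Option String))) :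
    Option String → Option String → Prop
  | refl (x : Option String) : Reach adj x x
  | step {x y z : Option String} (h : y ∈ PySem.Dict.getD adj x [])
      (r : Reach adj y z) : Reach adj x z

theorem Reach.snoc {adj : PySem.Dict (Option String) (List (Option String))}
    {a b c : Option String} (h : Reach adj a b) (hc : c ∈ PySem.Dict.getD adj b []) :
    Reach adj a c := by
  induction h with
  | refl x => exact Reach.step hc (Reach.refl c)
  | step h r ih => exact Reach.step h (ih hc)

theorem closed_not_reach {adj : PySem.Dict (Option String) (List (Option String))}
    {V : List (Option String)}
    (hcl : ∀ x ∈ V, ∀ y ∈ PySem.Dict.getD adj x [], y ∈ V)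
    {a b : Option String} (ha : a ∈ V) (hb : b ∉ V) : ¬ Reach adj a b := by
  intro hr
  induction hr with
  | refl x => exact hb ha
  | step h r ih => exact ih (hcl _ ha _ h) hb

theorem dfsA_true {adj : PySem.Dict (Option String) (List (Option String))} {from_id : String}
    (stack : List (Option String)) (vis : PySem.Set (Option String))
    (h : dfsA adj from_id stack vis = true) :
    ∃ x ∈ stack, Reach adj x (some from_id) := by
  fun_induction dfsA adj from_id stack vis with
  | case1 => cases h
  | case2 nid rest visited hf =>
    refine ⟨nid, List.mem_cons_self, ?_⟩
    have : nid = some from_id := by simpa using hf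
    rw [this]; exact Reach.refl _
  | case3 nid rest visited hf hv ih =>
    obtain ⟨x, hx, hr⟩ := ih h
    exact ⟨x, List.mem_cons_of_mem _ hx, hr⟩
  | case4 nid rest visited hf hv ih =>
    obtain ⟨x, hx, hr⟩ := ih h
    rw [List.mem_append, List.mem_reverse] at hx
    rcases hx with hx | hx
    · exact ⟨nid, List.mem_cons_self, Reach.step hx hr⟩
    · exact ⟨x, List.mem_cons_of_mem _ hx, hr⟩

theorem dfsA_false {adj : PySem.Dict (Option String) (List (Option String))} {from_id : String}
    (stack : List (Option String)) (vis : PySem.Set (Option String))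
    (hinv : ∀ x ∈ vis, x ≠ some from_id ∧
      ∀ y ∈ PySem.Dict.getD adj x [], y ∈ vis ∨ y ∈ stack)
    (h : dfsA adj from_id stack vis = false) :
    ∀ x, (x ∈ stack ∨ x ∈ vis) → ¬ Reach adj x (some from_id) := by
  fun_induction dfsA adj from_id stack vis with
  | case1 visited =>
    intro x hx
    rcases hx with hx | hx
    · cases hx
    · refine closed_not_reach (V := visited) ?_ hx ?_
      · intro a ha y hy
        rcases (hinv a ha).2 y hy with h1 | h1
        · exact h1
        · cases h1
      · intro hmem
        exact (hinv _ hmem).1 rfl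
  | case2 nid rest visited hf => cases h
  | case3 nid rest visited hf hv ih =>
    have hnidv : nid ∈ visited := contains_iff.1 hv
    have hinv' : ∀ x ∈ visited, x ≠ some from_id ∧
        ∀ y ∈ PySem.Dict.getD adj x [], y ∈ visited ∨ y ∈ rest := by
      intro x hx
      refine ⟨(hinv x hx).1, ?_⟩
      intro y hy
      rcases (hinv x hx).2 y hy with h1 | h1
      · exact Or.inl h1
      · rcases List.mem_cons.1 h1 with h1 | h1
        · exact Or.inl (h1 ▸ hnidv)
        · exact Or.inr h1
    intro x hx
    rcases hx with hx | hx
    · rcases List.mem_cons.1 hx with hx | hx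
      · exact ih hinv' h x (Or.inr (hx ▸ hnidv))
      · exact ih hinv' h x (Or.inl hx)
    · exact ih hinv' h x (Or.inr hx)
  | case4 nid rest visited hf hv ih =>
    have hnidne : nid ≠ some from_id := by simpa using hf
    have hinv' : ∀ x ∈ PySem.Set.add visited nid, x ≠ some from_id ∧
        ∀ y ∈ PySem.Dict.getD adj x [],
          y ∈ PySem.Set.add visited nid ∨ y ∈ (PySem.Dict.getD adj nid []).reverse ++ rest := by
      intro x hx
      rcases (PySem.Set.mem_add visited nid x).1 hx with hx | hx
      · refine ⟨(hinv x hx).1, ?_⟩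
        intro y hy
        rcases (hinv x hx).2 y hy with h1 | h1
        · exact Or.inl ((PySem.Set.mem_add visited nid y).2 (Or.inl h1))
        · rcases List.mem_cons.1 h1 with h1 | h1
          · exact Or.inl (h1 ▸ (PySem.Set.mem_add visited nid nid).2 (Or.inr rfl))
          · exact Or.inr (by rw [List.mem_append]; exact Or.inr h1)
      · subst hx
        refine ⟨hnidne, ?_⟩
        intro y hy
        exact Or.inr (by rw [List.mem_append, List.mem_reverse]; exact Or.inl hy)
    intro x hx
    rcases hx with hx | hx
    · rcases List.mem_cons.1 hx with hx | hx
      · exact ih hinv' h x (Or.inr (hx ▸ (PySem.Set.mem_add visited nid nid).2 (Or.inr rfl)))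
      · exact ih hinv' h x (Or.inl (by rw [List.mem_append]; exact Or.inr hx))
    · exact ih hinv' h x (Or.inr ((PySem.Set.mem_add visited nid x).2 (Or.inl hx)))

theorem bfsB_true {adj : PySem.Dict (Option String) (List (Option String))}
    {from_id : String} {root : Option String}
    (frontier reached : PySem.Set (Option String))
    (hf : ∀ x ∈ frontier, Reach adj root x)
    (h : bfsB adj from_id frontier reached = true) :
    Reach adj root (some from_id) := by
  fun_induction bfsB adj from_id frontier reached with
  | case1 => cases h
  | case2 frontier reached hne hc =>
    exact hf _ (contains_iff.1 hc)
  | case3 frontier reached hne hc frontier' ih =>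
    refine ih ?_ h
    intro x hx
    have hx' : x ∈ (nxtOf adj frontier).diff reached := hx
    unfold PySem.Set.diff at hx'
    rw [List.mem_filter] at hx'
    obtain ⟨n, hn, hxn⟩ := mem_nxtOf.1 hx'.1
    exact (hf n hn).snoc hxn

theorem bfsB_false {adj : PySem.Dict (Option String) (List (Option String))}
    {from_id : String}
    (frontier reached : PySem.Set (Option String))
    (h1 : ∀ x ∈ frontier, x ∈ reached)
    (h2 : ∀ x ∈ reached, x ∈ frontier ∨ ∀ y ∈ PySem.Dict.getD adj x [], y ∈ reached)
    (h3 : (some from_id) ∈ reached → (some from_id) ∈ frontier)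
    (h : bfsB adj from_id frontier reached = false) :
    ∀ x ∈ reached, ¬ Reach adj x (some from_id) := by
  fun_induction bfsB adj from_id frontier reached with
  | case1 frontier reached hne =>
    have hfe : frontier = [] := by simpa [List.isEmpty_iff] using hne
    subst hfe
    intro x hx
    refine closed_not_reach (V := reached) ?_ hx ?_
    · intro a ha y hy
      rcases h2 a ha with h0 | h0
      · cases h0
      · exact h0 y hy
    · intro hmem
      cases h3 hmem
  | case2 => cases h
  | case3 frontier reached hne hc frontier' ih =>
    have hfnot : (some from_id) ∉ frontier := fun hm => by
      rw [contains_iff.2 hm] at hc; exact hc rfl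
    intro x hx
    have hmemfr : ∀ y, y ∈ frontier' ↔ y ∈ nxtOf adj frontier ∧ y ∉ reached := by
      intro y
      constructor
      · intro hy
        have hy' : y ∈ (nxtOf adj frontier).diff reached := hy
        unfold PySem.Set.diff at hy'
        rw [List.mem_filter] at hy'
        exact ⟨hy'.1, by simpa [contains_iff] using hy'.2⟩
      · intro ⟨hy1, hy2⟩
        show y ∈ (nxtOf adj frontier).diff reached
        unfold PySem.Set.diff
        rw [List.mem_filter]
        exact ⟨hy1, by simpa [contains_iff] using hy2⟩
    have hmemun : ∀ y, y ∈ PySem.Set.union reached frontier' ↔ y ∈ reached ∨ y ∈ frontier' :=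
      fun y => PySem.Set.mem_union reached frontier' y
    refine ih ?_ ?_ ?_ h x ((hmemun x).2 (Or.inl hx))
    · intro y hy; exact (hmemun y).2 (Or.inr hy)
    · intro y hy
      rcases (hmemun y).1 hy with hy | hy
      · rcases h2 y hy with h0 | h0
        · -- y was in the old frontier: its children are all in nxt, hence reached ∪ frontier'
          right
          intro z hz
          have hznxt : z ∈ nxtOf adj frontier := mem_nxtOf.2 ⟨y, h0, hz⟩
          by_cases hzr : z ∈ reached
          · exact (hmemun z).2 (Or.inl hzr)
          · exact (hmemun z).2 (Or.inr ((hmemfr z).2 ⟨hznxt, hzr⟩))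
        · right
          intro z hz
          exact (hmemun z).2 (Or.inl (h0 z hz))
      · exact Or.inl hy
    · intro hy
      rcases (hmemun _).1 hy with hy | hy
      · exact absurd (h3 hy) hfnot
      · exact hy

theorem dfsA_iff {adj : PySem.Dict (Option String) (List (Option String))}
    {from_id to_id : String} :
    dfsA adj from_id [some to_id] PySem.Set.empty = true
      ↔ Reach adj (some to_id) (some from_id) := by
  constructor
  · intro h
    obtain ⟨x, hx, hr⟩ := dfsA_true _ _ h
    rcases List.mem_cons.1 hx with hx | hx
    · exact hx ▸ hr
    · cases hx
  · intro hr
    by_contra hfalse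
    have h : dfsA adj from_id [some to_id] PySem.Set.empty = false := by
      cases hdf : dfsA adj from_id [some to_id] PySem.Set.empty
      · rfl
      · exact absurd hdf hfalse
    exact dfsA_false _ _ (by intro x hx; cases hx) h (some to_id)
      (Or.inl List.mem_cons_self) hr

theorem bfsB_iff {adj : PySem.Dict (Option String) (List (Option String))}
    {from_id to_id : String} :
    bfsB adj from_id (PySem.Set.ofList [some to_id]) (PySem.Set.ofList [some to_id]) = true
      ↔ Reach adj (some to_id) (some from_id) := by
  have hof : PySem.Set.ofList [some to_id] = [some to_id] := rfl
  constructor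
  · intro h
    refine bfsB_true _ _ ?_ h
    intro x hx
    rw [hof] at hx
    rcases List.mem_cons.1 hx with hx | hx
    · exact hx ▸ Reach.refl _
    · cases hx
  · intro hr
    by_contra hfalse
    have h : bfsB adj from_id (PySem.Set.ofList [some to_id]) (PySem.Set.ofList [some to_id]) = false := by
      cases hdf : bfsB adj from_id (PySem.Set.ofList [some to_id]) (PySem.Set.ofList [some to_id])
      · rfl
      · exact absurd hdf hfalse
    refine bfsB_false _ _ (fun x hx => hx) ?_ (fun hm => hm) h (some to_id) ?_ hr
    · intro x hx
      exact Or.inl hx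
    · rw [hof]; exact List.mem_cons_self

-- ===== VERDICT (by name: the statement is the Claim_ definition above) =====
theorem has_cycle_with_edge_spec : Claim_equal_has_cycle_with_edge := by
  unfold Claim_equal_has_cycle_with_edge
  intro canvas from_id to_id _
  unfold Spec_has_cycle_with_edge has_cycle_with_edge has_cycle_with_edge_alt
  by_cases hft : (from_id == to_id) = true
  · simp [hft]
  · simp only [hft, Bool.false_eq_true, if_false]
    cases hA : dfsA (build_adj canvas) from_id [some to_id] PySem.Set.empty
    · cases hB : bfsB (build_adj canvas) from_id (PySem.Set.ofList [some to_id])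
          (PySem.Set.ofList [some to_id])
      · rfl
      · exact absurd (dfsA_iff.2 (bfsB_iff.1 hB)) (fun h => by rw [h] at hA; exact Bool.noConfusion hA)
    · exact (bfsB_iff.2 (dfsA_iff.1 hA)).symm
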